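-- pv_equiv track=rewrite | github.com/4084NOVA4084/Test_1 | Test_2.py | replace_chars
-- ===== SOURCE A (Python) =====
-- def replace_chars(input_str, k):    # define function and inputs
--     replaced_str = ''   # define replaced_str
--     seen_chars = {}     # define seen chars
--
--     for i, char in enumerate(input_str):    # get each number and char of the input string
--         if char in seen_chars and i - seen_chars[char] <= k:    #the char is occured in the previous k chars
--             replaced_str += '-'     # replaced by '-'
--         else:
--             replaced_str += char    # or use the original char
--         seen_chars[char] = i
--
--     return replaced_str     # return the new string
-- ===== SOURCE B (Python) =====
-- def replace_chars(input_str, k):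
--     # window re-scan: char at i becomes '-' iff it occurs in the previous k characters
--     return ''.join(
--         '-' if ch in input_str[max(0, i - k):i] else ch
--         for i, ch in enumerate(input_str)
--     )
-- ===== Notes on version B (the rewrite author's own statement) =====
-- stated objective: simpler
-- what changed: Drops the last-seen-index dictionary and the manual accumulator: each character is replaced iff it occurs in the re-scanned window input_str[max(0,i-k):i] of the previous up-to-k characters, built with a join over enumerate.
import Mathlib
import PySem

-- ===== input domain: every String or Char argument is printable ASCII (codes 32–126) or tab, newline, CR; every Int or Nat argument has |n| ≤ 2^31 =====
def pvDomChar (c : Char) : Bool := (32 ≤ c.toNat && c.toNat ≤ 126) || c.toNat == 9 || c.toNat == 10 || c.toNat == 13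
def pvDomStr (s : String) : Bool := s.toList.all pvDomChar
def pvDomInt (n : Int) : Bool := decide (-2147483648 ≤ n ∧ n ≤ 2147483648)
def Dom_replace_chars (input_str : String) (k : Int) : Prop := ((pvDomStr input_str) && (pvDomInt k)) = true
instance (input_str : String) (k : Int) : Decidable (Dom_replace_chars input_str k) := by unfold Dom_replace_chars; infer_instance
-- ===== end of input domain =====

-- B drops A's last-seen-index dictionary and accumulator: it re-scans the window of the
-- previous up-to-k characters at each position (simpler decomposition, no speed claim).

-- ===== PORT A =====
-- one loop iteration of A: append '-' or the char, then record the index in the dict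
def stepA (k : Int) (acc : List Char × PySem.Dict Char Int) (p : Int × Char) :
    List Char × PySem.Dict Char Int :=
  let out :=
    match acc.2.get? p.2 with          -- char in seen_chars and i - seen_chars[char] <= k
    | some j => if p.1 - j ≤ k then acc.1 ++ ['-'] else acc.1 ++ [p.2]
    | none => acc.1 ++ [p.2]
  (out, acc.2.insert p.2 p.1)          -- seen_chars[char] = i

def replace_chars (input_str : String) (k : Int) : String :=
  String.ofList
    (((PySem.List.enumerate input_str.toList 0).foldl (stepA k)
      ([], PySem.Dict.empty)).1)

-- ===== PORT B =====
-- '-' if ch in input_str[max(0, i - k):i] else ch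
def windowed (xs : List Char) (k : Int) (p : Int × Char) : Char :=
  if p.2 ∈ PySem.List.slice xs (some (max 0 (p.1 - k))) (some p.1) then '-' else p.2

def replace_chars_alt (input_str : String) (k : Int) : String :=
  String.ofList
    ((PySem.List.enumerate input_str.toList 0).map (windowed input_str.toList k))

-- ===== PRECONDITION & SPEC =====
def Spec_replace_chars (input_str : String) (k : Int) (out : String) : Prop := out = replace_chars_alt input_str k
instance (input_str : String) (k : Int) (out : String) : Decidable (Spec_replace_chars input_str k out) := by unfold Spec_replace_chars; infer_instance

-- ===== CLAIM (what is proved, stated in full; the proofs are below) =====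
def Claim_equal_replace_chars : Prop := ∀ (input_str : String) (k : Int), Dom_replace_chars input_str k → Spec_replace_chars input_str k (replace_chars input_str k)

-- ===== LEMMAS AND PROOFS =====

-- index of the LAST occurrence of a in ys (what A's dict records for a)
def lastOccN : List Char → Char → Option Nat
  | [], _ => none
  | c :: ys, a =>
    match lastOccN ys a with
    | some j => some (j + 1)
    | none => if c = a then some 0 else none

lemma lastOccN_isSome (ys : List Char) (a : Char) :
    (lastOccN ys a).isSome = true ↔ a ∈ ys := by
  induction ys with
  | nil => simp [lastOccN]
  | cons c ys ih =>
    simp only [lastOccN, List.mem_cons]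
    cases h : lastOccN ys a with
    | some j => simp [h] at ih ⊢; tauto
    | none =>
      simp [h] at ih ⊢
      by_cases hc : c = a
      · simp [hc]
      · simp [hc, ih]
        intro h'; exact hc h'.symm

lemma lastOccN_lt (ys : List Char) (a : Char) (j : Nat) (h : lastOccN ys a = some j) :
    j < ys.length := by
  induction ys generalizing j with
  | nil => simp [lastOccN] at h
  | cons c ys ih =>
    simp only [lastOccN] at h
    cases h' : lastOccN ys a with
    | some j' =>
      rw [h'] at h; simp at h
      have := ih j' h'
      simp; omega
    | none =>
      rw [h'] at h
      by_cases hc : c = a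
      · simp [hc] at h; simp; omega
      · simp [hc] at h

lemma mem_drop_iff_lastOccN (ys : List Char) (a : Char) (m : Nat) :
    a ∈ ys.drop m ↔ ∃ j, lastOccN ys a = some j ∧ m ≤ j := by
  induction ys generalizing m with
  | nil => simp [lastOccN]
  | cons c ys ih =>
    cases m with
    | zero =>
      simp only [List.drop_zero]
      constructor
      · intro h
        have hs : (lastOccN (c :: ys) a).isSome = true := (lastOccN_isSome _ _).2 h
        obtain ⟨j, hj⟩ := Option.isSome_iff_exists.1 hs
        exact ⟨j, hj, Nat.zero_le _⟩
      · rintro ⟨j, h, -⟩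
        exact (lastOccN_isSome _ _).1 (by simp [h])
    | succ m =>
      simp only [List.drop_succ_cons]
      rw [ih]
      constructor
      · rintro ⟨j0, hj0, hm⟩
        exact ⟨j0 + 1, by simp [lastOccN, hj0], by omega⟩
      · rintro ⟨j, hj, hm⟩
        simp only [lastOccN] at hj
        cases h' : lastOccN ys a with
        | some j0 =>
          rw [h'] at hj; simp at hj
          exact ⟨j0, rfl, by omega⟩
        | none =>
          rw [h'] at hj
          by_cases hc : c = a
          · simp [hc] at hj; omega
          · simp [hc] at hj

lemma lastOccN_append (ys : List Char) (b a : Char) :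
    lastOccN (ys ++ [b]) a = if b = a then some ys.length else lastOccN ys a := by
  induction ys with
  | nil => simp [lastOccN]
  | cons c ys ih =>
    simp only [List.cons_append, lastOccN, ih]
    by_cases hb : b = a
    · simp [hb]
    · simp only [hb, if_false]

-- the slice of a just-extended list, when both bounds stay within the old part, is a slice of the old part
lemma slice_append_right (xs t : List Char) (a b : Int) (h0 : 0 ≤ a) (hb : 0 ≤ b)
    (h : b.toNat ≤ xs.length) :
    PySem.List.slice (xs ++ t) (some a) (some b) = PySem.List.slice xs (some a) (some b) := by
  rw [PySem.List.slice_toNat _ h0 hb, PySem.List.slice_toNat _ h0 hb]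
  by_cases hle : a.toNat ≤ xs.length
  · rw [List.drop_append]
    have h1 : a.toNat - xs.length = 0 := by omega
    rw [h1, List.drop_zero]
    rw [List.take_append_of_le_length (by rw [List.length_drop]; omega)]
  · have h1 : b.toNat - a.toNat = 0 := by omega
    simp [h1]

-- B's condition at the freshly appended last position, expressed through lastOccN
lemma window_last (ys : List Char) (b : Char) (k : Int) :
    (b ∈ PySem.List.slice (ys ++ [b])
        (some (max 0 ((ys.length : Int) - k))) (some (ys.length : Int)))
      ↔ ∃ j, lastOccN ys b = some j ∧ (ys.length : Int) - (j : Int) ≤ k := by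
  have h0 : (0 : Int) ≤ max 0 ((ys.length : Int) - k) := le_max_left _ _
  have hb : (0 : Int) ≤ (ys.length : Int) := by positivity
  rw [PySem.List.slice_toNat _ h0 hb]
  set lo := max 0 ((ys.length : Int) - k) with hlo
  by_cases hle : lo.toNat ≤ ys.length
  · rw [List.drop_append]
    have h1 : lo.toNat - ys.length = 0 := by omega
    rw [h1, List.drop_zero, Int.toNat_natCast]
    rw [List.take_append_of_le_length (by rw [List.length_drop])]
    rw [List.take_of_length_le (by rw [List.length_drop])]
    rw [mem_drop_iff_lastOccN]
    constructor
    · rintro ⟨j, hj, hm⟩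
      exact ⟨j, hj, by omega⟩
    · rintro ⟨j, hj, hm⟩
      exact ⟨j, hj, by omega⟩
  · have h1 : (ys.length : Int).toNat - lo.toNat = 0 := by
      rw [Int.toNat_natCast]; omega
    rw [h1]
    simp only [List.take_zero, List.not_mem_nil, false_iff]
    rintro ⟨j, hj, hm⟩
    have := lastOccN_lt ys b j hj
    omega

-- main invariant: A's fold produces exactly B's windowed map, and its dict records lastOccN
lemma foldA_inv (k : Int) (ys : List Char) :
    ((PySem.List.enumerate ys 0).foldl (stepA k) ([], PySem.Dict.empty)).1
      = (PySem.List.enumerate ys 0).map (windowed ys k)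
    ∧ ∀ c, ((PySem.List.enumerate ys 0).foldl (stepA k) ([], PySem.Dict.empty)).2.get? c
          = (lastOccN ys c).map (fun j => (j : Int)) := by
  induction ys using List.reverseRecOn with
  | nil =>
    refine ⟨by simp [PySem.List.enumerate], fun c => ?_⟩
    simp [PySem.List.enumerate, lastOccN, PySem.Dict.empty, PySem.Dict.get?]
  | append_singleton ys b ih =>
    obtain ⟨ih1, ih2⟩ := ih
    have henum : PySem.List.enumerate (ys ++ [b]) 0
        = PySem.List.enumerate ys 0 ++ [((ys.length : Int), b)] := by
      rw [PySem.List.enumerate_append]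
      simp [PySem.List.enumerate_cons, PySem.List.enumerate_nil]
    rw [henum, List.foldl_append]
    set F := (PySem.List.enumerate ys 0).foldl (stepA k) ([], PySem.Dict.empty) with hF
    constructor
    · -- fst: output lists agree
      rw [List.map_append]
      have hmapeq : (PySem.List.enumerate ys 0).map (windowed (ys ++ [b]) k)
          = (PySem.List.enumerate ys 0).map (windowed ys k) := by
        apply List.map_congr_left
        intro p hp
        obtain ⟨i, hi, rfl⟩ := (PySem.List.mem_enumerate_iff ys 0 p).1 hp
        unfold windowed
        rw [slice_append_right _ _ _ _ (le_max_left _ _) (by positivity)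
          (by omega)]
      rw [hmapeq, ← ih1]
      show (stepA k F ((ys.length : Int), b)).1 = F.1 ++ [windowed (ys ++ [b]) k ((ys.length : Int), b)]
      unfold stepA windowed
      rw [ih2 b]
      cases hocc : lastOccN ys b with
      | none =>
        have hnm : ¬ b ∈ PySem.List.slice (ys ++ [b])
            (some (max 0 ((ys.length : Int) - k))) (some (ys.length : Int)) := by
          rw [window_last]
          rintro ⟨j, hj, -⟩; rw [hocc] at hj; cases hj
        simp_all
      | some j =>
        by_cases hcond : (ys.length : Int) - (j : Int) ≤ k
        · have hmem : b ∈ PySem.List.slice (ys ++ [b])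
              (some (max 0 ((ys.length : Int) - k))) (some (ys.length : Int)) :=
            (window_last ys b k).2 ⟨j, hocc, hcond⟩
          simp_all
        · have hmem : ¬ b ∈ PySem.List.slice (ys ++ [b])
              (some (max 0 ((ys.length : Int) - k))) (some (ys.length : Int)) := by
            rw [window_last]
            rintro ⟨j', hj', hc⟩; rw [hocc] at hj'; cases hj'; exact hcond hc
          simp_all
    · -- snd: dict records lastOccN
      intro c
      show ((stepA k F ((ys.length : Int), b)).2).get? c = _
      unfold stepA
      simp only
      rw [PySem.Dict.get?_insert]
      rw [lastOccN_append]
      by_cases hc : c = b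
      · simp [hc]
      · have : ¬ b = c := fun h => hc h.symm
        simp only [hc, if_false, this, if_false]
        exact ih2 c

-- ===== VERDICT (by name: the statement is the Claim_ definition above) =====
theorem replace_chars_spec : Claim_equal_replace_chars := by
  intro input_str k _
  unfold Spec_replace_chars replace_chars replace_chars_alt
  rw [(foldA_inv k input_str.toList).1]
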